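-- pv_equiv track=rewrite | github.com/fossabot/hellu-python-ohjelmointi | osa01-23_keittoa_vai_ei/test/test_keittoa_vai_ei.py | oikea_jarjestys
-- ===== SOURCE A (Python) =====
-- def oikea_jarjestys(output):
--     parts = output.split("\n")
--     hinta = False
--     for part in parts:
--         if 'Kokonaishinta on' in part:
--             hinta = True
--         if "Seuraava!" == part and not hinta:
--             return False
--
--     return True
-- ===== SOURCE B (Python) =====
-- def oikea_jarjestys(output):
--     parts = output.split("\n")
--     n = len(parts)
--     price_idx = next((i for i, p in enumerate(parts) if 'Kokonaishinta on' in p), n)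
--     seuraava_idx = next((i for i, p in enumerate(parts) if "Seuraava!" == p), n)
--     return seuraava_idx >= price_idx
-- ===== Notes on version B (the rewrite author's own statement) =====
-- stated objective: alternative
-- what changed: Replaced the interleaved flag-tracking loop with two independent first-match index computations (first total-price line, first 'Seuraava!' line) compared at the end.
import Mathlib
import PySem

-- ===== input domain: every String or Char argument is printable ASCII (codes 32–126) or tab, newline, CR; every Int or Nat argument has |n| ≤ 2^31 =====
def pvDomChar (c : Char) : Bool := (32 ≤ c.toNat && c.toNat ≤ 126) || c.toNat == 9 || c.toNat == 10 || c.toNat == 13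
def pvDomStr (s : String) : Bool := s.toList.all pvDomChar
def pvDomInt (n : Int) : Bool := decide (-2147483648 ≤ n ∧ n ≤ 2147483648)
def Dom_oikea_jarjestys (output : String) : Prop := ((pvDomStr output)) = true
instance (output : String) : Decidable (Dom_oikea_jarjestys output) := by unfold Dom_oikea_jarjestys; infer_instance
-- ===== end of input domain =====

-- B replaces A's interleaved flag-tracking pass with two first-match index scans compared at the end (alternative decomposition, same cost).

-- ===== PORT A =====
-- the for-loop over parts carrying the 'hinta' flag
def oikeaLoopA : List String → Bool → Bool
  | [], _ => true
  | p :: ps, hinta =>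
    let hinta' := if PySem.Str.isIn "Kokonaishinta on" p then true else hinta
    if "Seuraava!" == p && !hinta' then false else oikeaLoopA ps hinta'

def oikea_jarjestys (output : String) : Bool :=
  oikeaLoopA ((PySem.Str.split? output "\n").getD []) false

-- ===== PORT B =====
def oikea_jarjestys_alt (output : String) : Bool :=
  let parts := (PySem.Str.split? output "\n").getD []
  let priceIdx := parts.findIdx (fun p => PySem.Str.isIn "Kokonaishinta on" p)
  let seuraavaIdx := parts.findIdx (fun p => "Seuraava!" == p)
  decide (priceIdx ≤ seuraavaIdx)

-- ===== PRECONDITION & SPEC =====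
def Spec_oikea_jarjestys (output : String) (out : Bool) : Prop := out = oikea_jarjestys_alt output
instance (output : String) (out : Bool) : Decidable (Spec_oikea_jarjestys output out) := by unfold Spec_oikea_jarjestys; infer_instance

-- ===== CLAIM (what is proved, stated in full; the proofs are below) =====
def Claim_equal_oikea_jarjestys : Prop := ∀ (output : String), Dom_oikea_jarjestys output → Spec_oikea_jarjestys output (oikea_jarjestys output)

-- ===== LEMMAS AND PROOFS =====
theorem oikeaLoopA_true (ps : List String) : oikeaLoopA ps true = true := by
  induction ps with
  | nil => rfl
  | cons p ps ih => simp [oikeaLoopA, ih]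

theorem oikeaLoopA_eq_findIdx (ps : List String) :
    oikeaLoopA ps false =
      decide (ps.findIdx (fun p => PySem.Str.isIn "Kokonaishinta on" p)
        ≤ ps.findIdx (fun p => "Seuraava!" == p)) := by
  induction ps with
  | nil => rfl
  | cons p ps ih =>
    simp only [oikeaLoopA, List.findIdx_cons]
    cases hP : PySem.Str.isIn "Kokonaishinta on" p <;>
      cases hS : ("Seuraava!" == p) <;>
            simp [hP, hS, ih, oikeaLoopA_true, Nat.add_le_add_iff_right]

-- ===== VERDICT (by name: the statement is the Claim_ definition above) =====
theorem oikea_jarjestys_spec : Claim_equal_oikea_jarjestys := by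
  intro output _
  unfold Spec_oikea_jarjestys oikea_jarjestys oikea_jarjestys_alt
  exact oikeaLoopA_eq_findIdx _
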